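-- pv_equiv track=rewrite | github.com/rikicamme01/DialogiTECH | src/SegBert.py | prediction_to_bounds
-- ===== SOURCE A (Python) =====
-- def prediction_to_bounds(pred:list) -> list:
--     bounds = []
--     start = 0
--     end = 0
--     for i,e in enumerate(pred):
--         if e == 0:
--             end = i
--             bounds.append((start, end))
--             start = end + 1
--     if not bounds:
--         bounds.append((0, len(pred)))
--     return bounds
-- ===== SOURCE B (Python) =====
-- def _segments(xs, base):
--     # recursively split at the first zero: emit (base, absolute index of that zero), recurse past it
--     if 0 not in xs:
--         return []
--     z = xs.index(0)
--     return [(base, base + z)] + _segments(xs[z + 1:], base + z + 1)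
--
-- def prediction_to_bounds(pred: list) -> list:
--     segs = _segments(pred, 0)
--     return segs if segs else [(0, len(pred))]
-- ===== Notes on version B (the rewrite author's own statement) =====
-- stated objective: alternative
-- what changed: Replaces the stateful element-by-element accumulator loop with a recursive divide-and-conquer decomposition: locate the first zero with list.index, emit one segment, and recurse on the slice past that zero.
import Mathlib
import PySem

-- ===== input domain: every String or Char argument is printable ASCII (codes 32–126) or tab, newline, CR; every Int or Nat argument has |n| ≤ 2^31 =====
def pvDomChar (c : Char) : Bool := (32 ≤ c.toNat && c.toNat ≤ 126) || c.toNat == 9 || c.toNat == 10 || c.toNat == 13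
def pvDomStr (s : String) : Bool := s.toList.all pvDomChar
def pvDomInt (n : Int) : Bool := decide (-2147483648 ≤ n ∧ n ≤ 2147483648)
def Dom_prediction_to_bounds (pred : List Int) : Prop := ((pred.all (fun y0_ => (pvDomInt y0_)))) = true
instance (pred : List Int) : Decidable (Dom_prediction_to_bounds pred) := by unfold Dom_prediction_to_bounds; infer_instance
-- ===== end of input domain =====

-- B replaces A's stateful accumulator loop with a recursive split at the first zero (list.index + slice); objective: alternative decomposition.


-- ===== PORT A =====
-- loop state: (bounds, start, end); each zero at index i appends (start, i) and sets start := i + 1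
def prediction_to_bounds (pred : List Int) : List (Int × Int) :=
  let s := (PySem.List.enumerate pred 0).foldl
      (fun (st : List (Int × Int) × Int × Int) ie =>
        if ie.2 = 0 then (st.1 ++ [(st.2.1, ie.1)], ie.1 + 1, ie.1) else st)
      ([], 0, 0)
  if s.1 = [] then [(0, (pred.length : Int))] else s.1

-- ===== PORT B =====
-- '0 not in xs' followed by 'xs.index(0)' is ported as one match on index? (some z ↔ 0 ∈ xs with z its first index)
def ptbSegments (xs : List Int) (base : Int) : List (Int × Int) :=
  match h : PySem.List.index? xs 0 with
  | none => []
  | some z =>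
      (base, base + (z : Int)) ::
        ptbSegments (PySem.List.slice xs (some ((z + 1 : Nat) : Int)) none) (base + (z : Int) + 1)
termination_by xs.length
decreasing_by
  obtain ⟨hk, -, -⟩ := PySem.List.getElem_of_index?_eq_some h
  rw [PySem.List.slice_from_natCast]
  simp only [List.length_drop]
  omega

def prediction_to_bounds_alt (pred : List Int) : List (Int × Int) :=
  let segs := ptbSegments pred 0
  if segs = [] then [(0, (pred.length : Int))] else segs

-- ===== PRECONDITION & SPEC =====
def Spec_prediction_to_bounds (pred : List Int) (out : List (Int × Int)) : Prop := out = prediction_to_bounds_alt pred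
instance (pred : List Int) (out : List (Int × Int)) : Decidable (Spec_prediction_to_bounds pred out) := by unfold Spec_prediction_to_bounds; infer_instance

-- ===== CLAIM (what is proved, stated in full; the proofs are below) =====
def Claim_equal_prediction_to_bounds : Prop := ∀ (pred : List Int), Dom_prediction_to_bounds pred → Spec_prediction_to_bounds pred (prediction_to_bounds pred)

-- ===== LEMMAS AND PROOFS =====

-- proof-only generalisation of ptbSegments: the start of the FIRST emitted segment is st (later ones are base-style)
def ptbSegGen (xs : List Int) (k st : Int) : List (Int × Int) :=
  match h : PySem.List.index? xs 0 with
  | none => []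
  | some z =>
      (st, k + (z : Int)) :: ptbSegGen (xs.drop (z + 1)) (k + (z : Int) + 1) (k + (z : Int) + 1)
termination_by xs.length
decreasing_by
  obtain ⟨hk, -, -⟩ := PySem.List.getElem_of_index?_eq_some h
  simp only [List.length_drop]
  omega

theorem ptbSegments_eq_gen (xs : List Int) (b : Int) : ptbSegments xs b = ptbSegGen xs b b := by
  induction hn : xs.length using Nat.strong_induction_on generalizing xs b with
  | _ n ih =>
    rw [ptbSegments, ptbSegGen]
    cases h : PySem.List.index? xs 0 with
    | none => simp
    | some z =>
      obtain ⟨hk, -, -⟩ := PySem.List.getElem_of_index?_eq_some h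
      simp only [PySem.List.slice_from_natCast]
      rw [ih ((xs.drop (z + 1)).length) (by simp; omega) _ _ rfl]

theorem ptbSegGen_cons_zero (xs : List Int) (k st : Int) :
    ptbSegGen (0 :: xs) k st = (st, k) :: ptbSegGen xs (k + 1) (k + 1) := by
  have hs := PySem.List.index?_cons_self (x := (0 : Int)) (xs := xs)
  rw [PySem.List.index?_eq_idxOf?] at hs
  rw [ptbSegGen]
  split
  · next h => rw [PySem.List.index?_eq_idxOf?, hs] at h; exact absurd h (by simp)
  · next z h =>
      rw [PySem.List.index?_eq_idxOf?, hs] at h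
      obtain rfl : z = 0 := by simpa using h.symm
      simp

theorem ptbSegGen_cons_ne (x : Int) (hx : x ≠ 0) (xs : List Int) (k st : Int) :
    ptbSegGen (x :: xs) k st = ptbSegGen xs (k + 1) st := by
  have hs := PySem.List.index?_cons_of_ne (v := (0 : Int)) (xs := xs) hx
  rw [PySem.List.index?_eq_idxOf?, PySem.List.index?_eq_idxOf?] at hs
  rw [ptbSegGen]
  split
  · next h =>
      rw [PySem.List.index?_eq_idxOf?, hs] at h
      conv_rhs => rw [ptbSegGen]
      split
      · rfl
      · next z h2 =>
          rw [PySem.List.index?_eq_idxOf?] at h2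
          rw [h2] at h; simp at h
  · next z h =>
      rw [PySem.List.index?_eq_idxOf?, hs] at h
      cases h2 : List.idxOf? (0 : Int) xs with
      | none => rw [h2] at h; simp at h
      | some w =>
          rw [h2] at h
          obtain rfl : z = w + 1 := by simpa using h.symm
          conv_rhs => rw [ptbSegGen]
          split
          · next h3 =>
              rw [PySem.List.index?_eq_idxOf?, h2] at h3; simp at h3
          · next w' h3 =>
              rw [PySem.List.index?_eq_idxOf?, h2] at h3
              obtain rfl : w' = w := by simpa using h3.symm
              have h4 : (x :: xs).drop (w' + 1 + 1) = xs.drop (w' + 1) := by simp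
              rw [h4]
              push_cast
              ring_nf

-- A's loop over the remaining list, started at offset k with accumulated bounds and current start st,
-- produces exactly acc followed by B's recursive segment list with first start st.
theorem ptb_fold_eq (l : List Int) : ∀ (k : Int) (acc : List (Int × Int)) (st e : Int),
    ((PySem.List.enumerate l k).foldl
      (fun (s : List (Int × Int) × Int × Int) ie =>
        if ie.2 = 0 then (s.1 ++ [(s.2.1, ie.1)], ie.1 + 1, ie.1) else s)
      (acc, st, e)).1
    = acc ++ ptbSegGen l k st := by
  induction l with
  | nil =>
    intro k acc st e
    rw [ptbSegGen]
    simp [PySem.List.enumerate_nil, PySem.List.index?_eq_idxOf?]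
  | cons x xs ih =>
    intro k acc st e
    by_cases hx : x = 0
    · subst hx
      simp only [PySem.List.enumerate_cons, List.foldl_cons]
      rw [ih, ptbSegGen_cons_zero]
      simp
    · simp only [PySem.List.enumerate_cons, List.foldl_cons, if_neg hx]
      rw [ih, ptbSegGen_cons_ne x hx]

-- ===== VERDICT (by name: the statement is the Claim_ definition above) =====
theorem prediction_to_bounds_spec : Claim_equal_prediction_to_bounds := by
  intro pred _
  unfold Spec_prediction_to_bounds
  simp only [prediction_to_bounds, prediction_to_bounds_alt]
  rw [ptb_fold_eq, List.nil_append, ptbSegments_eq_gen]
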